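-- pv_equiv track=rewrite | github.com/algoldenberg/shelter-route-planner | services/shelter-service/app/api/shelter_submissions.py | looks_random
-- ===== SOURCE A (Python) =====
-- def looks_random(text: str) -> bool:
--     """
--     Detect random/spam strings
--     Checks for: no vowels, too many consonants in a row
--     """
--     if not text or len(text) < 3:
--         return False
--
--     # Remove numbers, spaces, commas - focus on letters
--     letters_only = ''.join(c for c in text if c.isalpha())
--     if len(letters_only) < 3:
--         return False
--
--     vowels = set('aeiouAEIOUаеёиоуыэюяАЕЁИОУЫЭЮЯ')  # English + Russian
--
--     # No vowels at all = suspicious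
--     if not any(c in vowels for c in letters_only):
--         return True
--
--     # More than 5 consonants in a row = suspicious
--     consonant_run = 0
--     for char in letters_only:
--         if char not in vowels:
--             consonant_run += 1
--             if consonant_run > 5:
--                 return True
--         else:
--             consonant_run = 0
--
--     return False
-- ===== SOURCE B (Python) =====
-- def looks_random(text: str) -> bool:
--     if not text or len(text) < 3:
--         return False
--     letters_only = [c for c in text if c.isalpha()]
--     if len(letters_only) < 3:
--         return False
--     vowels = set('aeiouAEIOUаеёиоуыэюяАЕЁИОУЫЭЮЯ')
--     groups = _vowel_runs(letters_only, vowels)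
--     if not any(k for k, _ in groups):
--         return True
--     return any((not k) and n >= 6 for k, n in groups)
--
--
-- def _vowel_runs(cs, vowels):
--     """Run-length encode cs by vowel-ness: list of (is_vowel, run_length)."""
--     groups = []
--     i, n = 0, len(cs)
--     while i < n:
--         k = cs[i] in vowels
--         j = i + 1
--         while j < n and (cs[j] in vowels) == k:
--             j += 1
--         groups.append((k, j - i))
--         i = j
--     return groups
-- ===== Notes on version B (the rewrite author's own statement) =====
-- stated objective: alternative
-- what changed: B run-length encodes the letters into maximal vowel/consonant runs and then checks the run list (no vowel run at all, or a consonant run of length >= 6), replacing A's incremental consonant counter with early return and its separate any() vowel pass.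
import Mathlib
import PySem

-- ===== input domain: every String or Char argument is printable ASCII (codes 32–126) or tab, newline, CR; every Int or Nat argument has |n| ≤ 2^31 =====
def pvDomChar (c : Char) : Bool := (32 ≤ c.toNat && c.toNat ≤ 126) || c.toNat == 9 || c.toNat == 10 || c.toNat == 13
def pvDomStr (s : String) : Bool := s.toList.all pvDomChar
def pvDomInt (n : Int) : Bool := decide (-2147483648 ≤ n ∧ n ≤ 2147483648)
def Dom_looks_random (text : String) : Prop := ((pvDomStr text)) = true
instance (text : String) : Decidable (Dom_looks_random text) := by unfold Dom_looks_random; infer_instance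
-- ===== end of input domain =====

-- B re-implements the spam check by run-length encoding the letters into maximal
-- vowel/consonant runs and inspecting the runs, instead of A's incremental
-- consonant counter with an early return (objective: alternative decomposition).

-- ===== PORT A =====
-- vowels = set('aeiouAEIOUаеёиоуыэюяАЕЁИОУЫЭЮЯ')  (both ports build the same set)
def pvVowels : PySem.Set Char := PySem.Set.ofList "aeiouAEIOUаеёиоуыэюяАЕЁИОУЫЭЮЯ".toList

def pvIsVowel (c : Char) : Bool := PySem.Set.contains pvVowels c

-- the 'for char in letters_only' loop with its consonant_run counter
def pvLoopA : Nat → List Char → Bool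
  | _, [] => false
  | run, c :: cs =>
    if !(pvIsVowel c) then
      if run + 1 > 5 then true else pvLoopA (run + 1) cs
    else pvLoopA 0 cs

def looks_random (text : String) : Bool :=
  let tl := text.toList
  if tl.isEmpty || decide (tl.length < 3) then false
  else
    let letters := tl.filter PySem.Chars.isalpha
    if decide (letters.length < 3) then false
    else if !(letters.any pvIsVowel) then true
    else pvLoopA 0 letters

-- ===== PORT B =====
-- _vowel_runs: run-length encoding by vowel-ness; the outer while loop emits
-- one maximal run per step — here: count the same-key prefix, recurse on the rest.
def pvRuns (cs : List Char) : List (Bool × Nat) :=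
  match cs with
  | [] => []
  | c :: rest =>
    (pvIsVowel c, 1 + (rest.takeWhile (fun d => pvIsVowel d == pvIsVowel c)).length)
      :: pvRuns (rest.dropWhile (fun d => pvIsVowel d == pvIsVowel c))
termination_by cs.length
decreasing_by
  simp only [List.length_cons]
  exact Nat.lt_succ_of_le (List.length_dropWhile_le _ _)

def looks_random_alt (text : String) : Bool :=
  let tl := text.toList
  if tl.isEmpty || decide (tl.length < 3) then false
  else
    let letters := tl.filter PySem.Chars.isalpha
    if decide (letters.length < 3) then false
    else
      let groups := pvRuns letters
      if !(groups.any (·.1)) then true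
      else groups.any (fun g => !g.1 && decide (6 ≤ g.2))

-- ===== PRECONDITION & SPEC =====
def Spec_looks_random (text : String) (out : Bool) : Prop := out = looks_random_alt text
instance (text : String) (out : Bool) : Decidable (Spec_looks_random text out) := by unfold Spec_looks_random; infer_instance

-- ===== CLAIM (what is proved, stated in full; the proofs are below) =====
def Claim_equal_looks_random : Prop := ∀ (text : String), Dom_looks_random text → Spec_looks_random text (looks_random text)

-- ===== LEMMAS AND PROOFS =====

-- beq with a fixed boolean
lemma pvBeq_true (d : Char) : (pvIsVowel d == true) = pvIsVowel d := by
  cases h : pvIsVowel d <;> simp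

lemma pvBeq_false (d : Char) : (pvIsVowel d == false) = !(pvIsVowel d) := by
  cases h : pvIsVowel d <;> simp

-- dropping leading consonants does not change whether a vowel exists
lemma pvAny_dropWhile (l : List Char) :
    (l.dropWhile (fun d => !(pvIsVowel d))).any pvIsVowel = l.any pvIsVowel := by
  induction l with
  | nil => rfl
  | cons c cs ih =>
    by_cases h : pvIsVowel c = true
    · simp [List.dropWhile, h]
    · simp only [Bool.not_eq_true] at h
      simp [List.dropWhile, h, ih]

-- some run has key true  ↔  some letter is a vowel
lemma pvRuns_any_key (l : List Char) :
    (pvRuns l).any (·.1) = l.any pvIsVowel := by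
  induction l using pvRuns.induct with
  | case1 => simp [pvRuns]
  | case2 c rest ih =>
    rw [pvRuns]
    cases h : pvIsVowel c with
    | true => simp [h]
    | false =>
      simp only [h, pvBeq_false] at ih ⊢
      simp only [List.any_cons, h, Bool.false_or]
      rw [ih, pvAny_dropWhile]

-- length of the leading consonant run
def pvLead (l : List Char) : Nat := (l.takeWhile (fun d => !(pvIsVowel d))).length

lemma pvBig_of_lead (l : List Char) (h : 5 < pvLead l) :
    (pvRuns l).any (fun g => !g.1 && decide (6 ≤ g.2)) = true := by
  cases l with
  | nil => simp [pvLead, List.takeWhile] at h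
  | cons c cs =>
    by_cases hv : pvIsVowel c = true
    · simp [pvLead, List.takeWhile, hv] at h
    · simp only [Bool.not_eq_true] at hv
      rw [pvRuns]
      simp only [hv, pvBeq_false, List.any_cons]
      simp only [pvLead, List.takeWhile, hv] at h
      simp only [Bool.not_false, List.length_cons] at h ⊢
      have : 6 ≤ 1 + (cs.takeWhile (fun d => !(pvIsVowel d))).length := by omega
      simp [this]

-- from a run-length check being false, the leading consonant run is short
lemma pvLead_le_of_not_big (l : List Char)
    (hbig : (pvRuns l).any (fun g => !g.1 && decide (6 ≤ g.2)) = false) :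
    pvLead l ≤ 5 := by
  by_contra hgt
  rw [pvBig_of_lead l (by omega)] at hbig
  exact Bool.noConfusion hbig

-- A's counter loop, characterised by the leading run plus the run-length encoding
lemma pvLoopA_eq (l : List Char) : ∀ run : Nat, run ≤ 5 →
    pvLoopA run l =
      (decide (5 < run + pvLead l) || (pvRuns l).any (fun g => !g.1 && decide (6 ≤ g.2))) := by
  induction l with
  | nil => intro run h; simp [pvLoopA, pvRuns, pvLead, List.takeWhile]; omega
  | cons c cs ih =>
    intro run hrun
    by_cases hv : pvIsVowel c = true
    · -- vowel head: counter resets; head run contributes nothing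
      have hlead : pvLead (c :: cs) = 0 := by simp [pvLead, List.takeWhile, hv]
      rw [pvRuns]
      simp only [pvLoopA, hv, Bool.not_true, Bool.false_eq_true, if_false, hlead,
        pvBeq_true, List.any_cons, Bool.not_true, Bool.false_and, Bool.false_or]
      have h5 : ¬ (5 < run + 0) := by omega
      simp only [decide_eq_false h5, Bool.false_or]
      rw [ih 0 (by omega)]
      cases cs with
      | nil => simp [pvRuns, pvLead, List.takeWhile]
      | cons d cs' =>
        by_cases hd : pvIsVowel d = true
        · have hlead2 : pvLead (d :: cs') = 0 := by simp [pvLead, List.takeWhile, hd]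
          rw [pvRuns]
          simp [hd, hlead2, List.dropWhile]
        · simp only [Bool.not_eq_true] at hd
          have hdrop : (d :: cs').dropWhile pvIsVowel = d :: cs' := by
            simp [List.dropWhile, hd]
          rw [hdrop]
          cases hbig : (pvRuns (d :: cs')).any (fun g => !g.1 && decide (6 ≤ g.2)) with
          | true => simp
          | false =>
            have hle : pvLead (d :: cs') ≤ 5 := pvLead_le_of_not_big _ hbig
            simp
            omega
    · -- consonant head
      simp only [Bool.not_eq_true] at hv
      have hlead : pvLead (c :: cs) = 1 + pvLead cs := by
        simp [pvLead, List.takeWhile, hv]; omega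
      rw [pvRuns]
      simp only [pvLoopA, hv, Bool.not_false, if_true, hlead, pvBeq_false,
        List.any_cons, Bool.true_and]
      have htw : (cs.takeWhile (fun d => !(pvIsVowel d))).length = pvLead cs := rfl
      rw [htw]
      by_cases h5 : run = 5
      · subst h5
        have h6 : (5:Nat) + 1 > 5 := by omega
        have h7 : 5 < 5 + (1 + pvLead cs) := by omega
        simp [h6]
      · have hlt : ¬ (run + 1 > 5) := by omega
        simp only [if_neg hlt]
        rw [ih (run + 1) (by omega)]
        set X := (pvRuns (cs.dropWhile (fun x => !(pvIsVowel x)))).any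
          (fun g => !g.1 && decide (6 ≤ g.2)) with hX
        -- relate any(runs cs) with X and the two decides via a case split on cs
        cases cs with
        | nil =>
          rw [hX]
          simp [pvRuns, pvLead, List.takeWhile, List.dropWhile]
        | cons d cs' =>
          by_cases hd : pvIsVowel d = true
          · have hlead2 : pvLead (d :: cs') = 0 := by simp [pvLead, List.takeWhile, hd]
            have hdrop : (d :: cs').dropWhile (fun x => !(pvIsVowel x)) = d :: cs' := by
              simp [List.dropWhile, hd]
            rw [hlead2] at *
            rw [hdrop] at hX
            have c3 : ¬ (6 ≤ 1 + (0:Nat)) := by omega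
            simp [hX]
          · simp only [Bool.not_eq_true] at hd
            have hlead2 : pvLead (d :: cs') = 1 + pvLead cs' := by
              simp [pvLead, List.takeWhile, hd]; omega
            have hdrop : (d :: cs').dropWhile (fun x => !(pvIsVowel x)) =
                cs'.dropWhile (fun x => !(pvIsVowel x)) := by
              simp [List.dropWhile, hd]
            rw [hdrop] at hX
            conv_lhs => rw [pvRuns]
            simp only [hd, pvBeq_false, List.any_cons, Bool.not_false, Bool.true_and]
            have htw' : (cs'.takeWhile (fun x => !(pvIsVowel x))).length = pvLead cs' := rfl
            rw [htw', hlead2, ← hX]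
            set a := pvLead cs'
            by_cases c1 : 5 < run + 1 + (1 + a)
            · have c2 : 5 < run + (1 + (1 + a)) := by omega
              simp [decide_eq_true c1, decide_eq_true c2]
            · have c2 : ¬ 5 < run + (1 + (1 + a)) := by omega
              have c3 : ¬ 6 ≤ 1 + a := by omega
              have c4 : ¬ 6 ≤ 1 + (1 + a) := by omega
              simp [decide_eq_false c1, decide_eq_false c2, decide_eq_false c3,
                decide_eq_false c4]

-- ===== VERDICT (by name: the statement is the Claim_ definition above) =====
theorem looks_random_spec : Claim_equal_looks_random := by
  intro text _
  unfold Spec_looks_random looks_random looks_random_alt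
  set tl := text.toList
  by_cases h1 : (tl.isEmpty || decide (tl.length < 3)) = true
  · simp [h1]
  · simp only [h1, if_false, Bool.false_eq_true]
    set letters := tl.filter PySem.Chars.isalpha with hl
    by_cases h2 : decide (letters.length < 3) = true
    · simp [h2]
    · simp only [h2, if_false, Bool.false_eq_true]
      rw [pvRuns_any_key]
      by_cases h3 : letters.any pvIsVowel = true
      · simp only [h3, Bool.not_true, Bool.false_eq_true, if_false]
        rw [pvLoopA_eq letters 0 (by omega)]
        cases hbig : (pvRuns letters).any (fun g => !g.1 && decide (6 ≤ g.2)) with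
        | true => simp
        | false =>
          have hle : pvLead letters ≤ 5 := pvLead_le_of_not_big _ hbig
          simp
          omega
      · simp [h3]
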